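-- pv_equiv track=rewrite | github.com/Hamster-lord/Battle-sim | gamescript/common/game/convert_formation_preset.py | min_max_order
-- ===== SOURCE A (Python) =====
-- def min_max_order(order_list, how):
--     if how == "row" or how == "both":
--         run = 0
--         for index, item in enumerate(list(reversed(order_list[0]))):
--             order_list[0].insert(index + 1 + run, item)
--             run += 1
--         order_list[0] = order_list[0][:int(len(order_list[0]) / 2)]
--     if how == "column" or how == "both":
--         run = 0
--         for index, item in enumerate(list(reversed(order_list[1]))):
--             order_list[1].insert(index + 1 + run, item)
--             run += 1
--         order_list[1] = order_list[1][:int(len(order_list[1]) / 2)]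
--     return order_list
-- ===== SOURCE B (Python) =====
-- def min_max_order(order_list, how):
--     # Index-formula rebuild: position k takes xs[k//2] from the front when k is
--     # even and xs[n-1-k//2] from the back when k is odd, instead of A's repeated
--     # mid-list inserts.  Return-value equivalence only: A mutates order_list in
--     # place, B builds a fresh list.
--     def weave(xs):
--         n = len(xs)
--         return [xs[k // 2] if k % 2 == 0 else xs[n - 1 - k // 2] for k in range(n)]
--     return [weave(row) if (i == 0 and how in ("row", "both"))
--             or (i == 1 and how in ("column", "both")) else row
--             for i, row in enumerate(order_list)]
-- ===== Notes on version B (the rewrite author's own statement) =====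
-- stated objective: alternative
-- what changed: Replaced the per-element mid-list insert loop by a direct index-formula comprehension taking xs[k//2] from the front for even k and xs[n-1-k//2] from the back for odd k, with the row/column selection done in one enumerate-map pass over the outer list.
import Mathlib
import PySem

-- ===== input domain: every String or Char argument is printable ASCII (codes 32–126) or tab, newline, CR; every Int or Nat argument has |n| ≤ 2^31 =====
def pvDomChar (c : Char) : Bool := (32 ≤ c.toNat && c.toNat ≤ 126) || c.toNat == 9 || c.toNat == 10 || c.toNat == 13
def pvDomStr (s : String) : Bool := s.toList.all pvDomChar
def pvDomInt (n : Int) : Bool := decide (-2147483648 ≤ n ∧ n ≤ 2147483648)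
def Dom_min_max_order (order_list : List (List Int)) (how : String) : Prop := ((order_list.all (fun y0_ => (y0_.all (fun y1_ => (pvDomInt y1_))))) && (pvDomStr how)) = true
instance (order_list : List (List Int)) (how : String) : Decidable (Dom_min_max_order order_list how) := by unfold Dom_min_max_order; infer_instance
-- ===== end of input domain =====

-- B rebuilds each woven list by a direct index formula (front xs[k//2] / back xs[n-1-k//2]) over an
-- enumerate-map of the outer list instead of A's repeated mid-list inserts (alternative algorithm);
-- A mutates order_list in place, B returns a fresh list: return-value equivalence only.


-- ===== PORT A =====
-- the 'run = 0; for index, item in enumerate(list(reversed(xs))): xs.insert(index+1+run, item); run += 1;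
-- xs = xs[:int(len(xs)/2)]' block of A, applied to order_list[0] / order_list[1].
-- int(len(ys)/2) on the nonnegative even length equals floor division by 2.
def weaveA (xs : List Int) : List Int :=
  let st := (PySem.List.enumerate xs.reverse 0).foldl
      (fun (st : List Int × Int) p => (PySem.List.insert st.1 (p.1 + 1 + st.2) p.2, st.2 + 1)) (xs, 0)
  PySem.List.slice st.1 none (some (PySem.Int.floordiv (st.1.length : Int) 2))

def min_max_order (order_list : List (List Int)) (how : String) : List (List Int) :=
  -- order_list[0] / order_list[1]: IndexError on too-short order_list is excluded by Pre_,
  -- so getD / List.set model the subscript read and the slot assignment exactly.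
  let l1 := if how == "row" || how == "both" then
      order_list.set 0 (weaveA (order_list.getD 0 [])) else order_list
  if how == "column" || how == "both" then
      l1.set 1 (weaveA (l1.getD 1 [])) else l1

-- ===== PORT B =====
-- '[xs[k // 2] if k % 2 == 0 else xs[n - 1 - k // 2] for k in range(n)]'; indices are always
-- in range (k < n), so pyGetD models the subscript exactly.
def weaveB (xs : List Int) : List Int :=
  (PySem.List.pyRange 0 (xs.length : Int) 1).map fun k =>
    if PySem.Int.mod k 2 == 0 then PySem.List.pyGetD xs (PySem.Int.floordiv k 2) 0
    else PySem.List.pyGetD xs ((xs.length : Int) - 1 - PySem.Int.floordiv k 2) 0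

-- '[weave(row) if (i == 0 and how in ("row","both")) or (i == 1 and how in ("column","both"))
--   else row for i, row in enumerate(order_list)]'
def min_max_order_alt (order_list : List (List Int)) (how : String) : List (List Int) :=
  (PySem.List.enumerate order_list 0).map fun p =>
    if (p.1 == 0 && (how == "row" || how == "both"))
        || (p.1 == 1 && (how == "column" || how == "both")) then weaveB p.2 else p.2

-- ===== PRECONDITION & SPEC =====
-- A raises IndexError reading order_list[0] (resp. order_list[1]) when how selects a row/column
-- the outer list does not have; exactly those inputs are excluded.
def Pre_min_max_order (order_list : List (List Int)) (how : String) : Prop :=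
  ((how = "row" ∨ how = "both") → order_list ≠ []) ∧
  ((how = "column" ∨ how = "both") → 2 ≤ order_list.length)
instance (order_list : List (List Int)) (how : String) : Decidable (Pre_min_max_order order_list how) := by unfold Pre_min_max_order; infer_instance
def pvWitness_min_max_order : List (List Int) × String := ([[1, 2, 3, 4], [5, 6]], "both")

def Spec_min_max_order (order_list : List (List Int)) (how : String) (out : List (List Int)) : Prop := out = min_max_order_alt order_list how
instance (order_list : List (List Int)) (how : String) (out : List (List Int)) : Decidable (Spec_min_max_order order_list how out) := by unfold Spec_min_max_order; infer_instance

-- ===== CLAIM (what is proved, stated in full; the proofs are below) =====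
def Claim_equal_min_max_order : Prop := ∀ (order_list : List (List Int)) (how : String), Dom_min_max_order order_list how → Pre_min_max_order order_list how → Spec_min_max_order order_list how (min_max_order order_list how)
-- ===== LEMMAS AND PROOFS =====

-- Invariant of A's insert loop: with the already-woven prefix W (length 2k) in place and run = k,
-- folding the remaining enumerated reversed elements r2 over the remaining suffix suf weaves them in.
lemma weaveA_loop (r2 : List Int) : ∀ (k : ℕ) (W suf : List Int),
    W.length = 2 * k → suf.length = r2.length →
    (PySem.List.enumerate r2 (k : Int)).foldl
      (fun (st : List Int × Int) p => (PySem.List.insert st.1 (p.1 + 1 + st.2) p.2, st.2 + 1))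
      (W ++ suf, (k : Int)) =
    (W ++ (suf.zip r2).flatMap (fun p => [p.1, p.2]), (k : Int) + r2.length) := by
  induction r2 with
  | nil =>
    intro k W suf hW hlen
    rcases List.length_eq_zero_iff.mp hlen with rfl
    simp [PySem.List.enumerate]
  | cons r0 r2' ih =>
    intro k W suf hW hlen
    match suf, hlen with
    | s0 :: suf', hlen =>
      rw [PySem.List.enumerate_cons]
      simp only [List.foldl_cons]
      have hpos : ((k : Int) + 1 + (k : Int)) = ((2 * k + 1 : ℕ) : Int) := by push_cast; ring
      have hle : 2 * k + 1 ≤ (W ++ s0 :: suf').length := by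
        simp [List.length_append, hW]
      rw [hpos, PySem.List.insert_natCast _ _ _ hle]
      have hsplit : W ++ s0 :: suf' = (W ++ [s0]) ++ suf' := by simp
      have hlenW : (W ++ [s0]).length = 2 * k + 1 := by
        simp only [List.length_append, List.length_cons, List.length_nil, hW]
      have htake : (W ++ s0 :: suf').take (2 * k + 1) = W ++ [s0] := by
        rw [hsplit, List.take_left' hlenW]
      have hdrop : (W ++ s0 :: suf').drop (2 * k + 1) = suf' := by
        rw [hsplit, List.drop_left' hlenW]
      rw [htake, hdrop]
      have hcast : ((k : Int) + 1) = ((k + 1 : ℕ) : Int) := by push_cast; ring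
      have hW' : (W ++ [s0, r0]).length = 2 * (k + 1) := by
        simp only [List.length_append, List.length_cons, List.length_nil, hW]; omega
      have hlen' : suf'.length = r2'.length := by simpa using hlen
      have := ih (k + 1) (W ++ [s0, r0]) suf' hW' hlen'
      rw [hcast]
      have hre : W ++ [s0] ++ r0 :: suf' = (W ++ [s0, r0]) ++ suf' := by simp
      rw [hre, this, Prod.mk.injEq]
      constructor
      · simp [List.flatMap_cons]
      · simp only [List.length_cons]; push_cast; ring

-- element k of the pair-flattened list is the k/2-th pair's left or right component
lemma pairFlat_getElem? (l : List (Int × Int)) : ∀ (k : ℕ),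
    (l.flatMap fun p => [p.1, p.2])[k]? =
      (l[k / 2]?).map (fun p => if k % 2 = 0 then p.1 else p.2) := by
  induction l with
  | nil => intro k; simp
  | cons a t ih =>
    intro k
    match k with
    | 0 => simp
    | 1 => simp
    | k + 2 =>
      have h2 : (k + 2) / 2 = k / 2 + 1 := by omega
      have h3 : (k + 2) % 2 = k % 2 := by omega
      simp only [List.flatMap_cons, List.cons_append, List.nil_append,
        List.getElem?_cons_succ, h2, h3, ih k]

lemma weaveA_eq_take (xs : List Int) :
    weaveA xs = ((xs.zip xs.reverse).flatMap (fun p => [p.1, p.2])).take xs.length := by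
  unfold weaveA
  have h := weaveA_loop xs.reverse 0 [] xs (by simp) (by simp)
  simp only [Nat.cast_zero, List.nil_append] at h
  rw [h]
  have hlen : ((xs.zip xs.reverse).flatMap (fun p => [p.1, p.2])).length = 2 * xs.length := by
    have h2 : ∀ (l : List (Int × Int)), (l.flatMap (fun p => ([p.1, p.2] : List Int))).length = 2 * l.length := by
      intro l; induction l with
      | nil => simp
      | cons a t iht =>
        simp only [List.flatMap_cons, List.length_append, List.length_cons, List.length_nil, iht]
        omega
    rw [h2]
    simp [List.length_zip]
  simp only [hlen]
  have hfd : PySem.Int.floordiv ((2 * xs.length : ℕ) : Int) 2 = ((2 * xs.length / 2 : ℕ) : Int) := by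
    exact_mod_cast PySem.Int.floordiv_natCast (2 * xs.length) 2
  rw [hfd]
  have h2 : 2 * xs.length / 2 = xs.length := by omega
  rw [h2, PySem.List.slice_to]
  · simp
  · positivity

lemma weave_eq (xs : List Int) : weaveA xs = weaveB xs := by
  rw [weaveA_eq_take]
  have hzlen : (xs.zip xs.reverse).length = xs.length := by simp
  have hflen : ((xs.zip xs.reverse).flatMap (fun p => [p.1, p.2])).length = 2 * xs.length := by
    have h2 : ∀ (l : List (Int × Int)), (l.flatMap (fun p => ([p.1, p.2] : List Int))).length = 2 * l.length := by
      intro l; induction l with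
      | nil => simp
      | cons a t iht => simp only [List.flatMap_cons, List.length_append, List.length_cons,
          List.length_nil, iht]; omega
    rw [h2, hzlen]
  apply List.ext_getElem
  · simp only [List.length_take, hflen, weaveB, List.length_map, PySem.List.length_pyRange_one]
    omega
  · intro k hk1 hk2
    have hkn : k < xs.length := by rw [List.length_take, hflen] at hk1; omega
    -- left side: element k of the flattened zip
    have hL : (((xs.zip xs.reverse).flatMap (fun p => [p.1, p.2])).take xs.length)[k]'hk1 =
        if k % 2 = 0 then xs[k / 2]'(by omega) else xs[xs.length - 1 - k / 2]'(by omega) := by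
      have hkd : k / 2 < (xs.zip xs.reverse).length := by rw [hzlen]; omega
      have hsome := pairFlat_getElem? (xs.zip xs.reverse) k
      rw [List.getElem?_eq_getElem (by omega), List.getElem?_eq_getElem hkd] at hsome
      simp only [Option.map_some, Option.some.injEq] at hsome
      rw [List.getElem_take, hsome]
      have hz : (xs.zip xs.reverse)[k / 2]'hkd =
          (xs[k / 2]'(by omega), xs.reverse[k / 2]'(by simp; omega)) := by
        simp [List.getElem_zip]
      rw [hz]
      have hrev : xs.reverse[k / 2]'(by simp; omega) = xs[xs.length - 1 - k / 2]'(by omega) := by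
        simp [List.getElem_reverse]
      split_ifs <;> simp [hrev]
    rw [hL]
    -- right side: weaveB's comprehension at index k
    have hBk : (weaveB xs)[k]'hk2 =
        (fun j => if PySem.Int.mod j 2 == 0 then PySem.List.pyGetD xs (PySem.Int.floordiv j 2) 0
          else PySem.List.pyGetD xs (((xs.length : Int)) - 1 - PySem.Int.floordiv j 2) 0) ((0 : Int) + k) := by
      simp [weaveB, PySem.List.getElem_pyRange_one]
    rw [hBk]
    simp only [zero_add]
    have hmod : PySem.Int.mod (k : Int) 2 = ((k % 2 : ℕ) : Int) := by
      exact_mod_cast PySem.Int.mod_natCast k 2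
    have hdiv : PySem.Int.floordiv (k : Int) 2 = ((k / 2 : ℕ) : Int) := by
      exact_mod_cast PySem.Int.floordiv_natCast k 2
    rw [hmod, hdiv]
    by_cases hpar : k % 2 = 0
    · simp only [hpar, Nat.cast_zero, beq_self_eq_true, if_true]
      rw [PySem.List.pyGetD_natCast]
      exact (List.getD_eq_getElem xs 0 (by omega)).symm
    · have hb : (((k % 2 : ℕ) : Int) == 0) = false := by
        simp only [beq_eq_false_iff_ne, ne_eq, Nat.cast_eq_zero]; exact hpar
      simp only [hb, Bool.false_eq_true, if_false, if_neg hpar]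
      have hcast : ((xs.length : Int)) - 1 - ((k / 2 : ℕ) : Int) = ((xs.length - 1 - k / 2 : ℕ) : Int) := by omega
      rw [hcast, PySem.List.pyGetD_natCast]
      exact (List.getD_eq_getElem xs 0 (by omega)).symm

-- elements of the enumerate-map tail with indices past every selected slot are unchanged
lemma enum_skip (a b : Bool) (t : List (List Int)) : ∀ (s : Int), 0 ≤ s →
    (a = true → 1 ≤ s) → (b = true → 2 ≤ s) →
    (PySem.List.enumerate t s).map
      (fun p => if (p.1 == 0 && a) || (p.1 == 1 && b) then weaveB p.2 else p.2) = t := by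
  induction t with
  | nil => intro s _ _ _; simp [PySem.List.enumerate]
  | cons x t ih =>
    intro s h0 ha hb
    rw [PySem.List.enumerate_cons]
    have hcond : (((s : Int) == 0) && a || ((s : Int) == 1) && b) = false := by
      cases a <;> cases b <;> simp_all <;> omega
    simp only [List.map_cons, hcond, Bool.false_eq_true, if_false]
    rw [ih (s + 1) (by omega) (fun _ => by omega) (fun h => by have := hb h; omega)]

-- ===== VERDICT (by name: the statement is the Claim_ definition above) =====
theorem min_max_order_spec : Claim_equal_min_max_order := by
  intro order_list how _ hpre
  unfold Spec_min_max_order min_max_order min_max_order_alt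
  obtain ⟨hp1, hp2⟩ := hpre
  by_cases hr : (how == "row" || how == "both") = true <;>
    by_cases hc : (how == "column" || how == "both") = true
  · -- both selected: order_list has at least two rows
    have hlen : 2 ≤ order_list.length := hp2 (by
      rcases Bool.or_eq_true_iff.mp hc with h | h
      · exact Or.inl (by simpa using h)
      · exact Or.inr (by simpa using h))
    match order_list, hlen with
    | x0 :: x1 :: t, _ =>
      simp only [hr, hc, if_true, List.getD_cons_zero, List.set_cons_zero,
        List.getD_cons_succ, List.set_cons_succ, PySem.List.enumerate_cons, List.map_cons]
      rw [enum_skip _ _ t (0 + 1 + 1) (by norm_num) (fun _ => by norm_num) (fun _ => by norm_num)]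
      simp [weave_eq]
  · -- row only: order_list nonempty
    rw [Bool.not_eq_true] at hc
    have hne : order_list ≠ [] := hp1 (by
      rcases Bool.or_eq_true_iff.mp hr with h | h
      · exact Or.inl (by simpa using h)
      · exact Or.inr (by simpa using h))
    match order_list, hne with
    | x0 :: t, _ =>
      simp only [hr, hc, if_true, Bool.false_eq_true, if_false, List.getD_cons_zero,
        List.set_cons_zero, PySem.List.enumerate_cons, List.map_cons]
      rw [enum_skip _ _ t (0 + 1) (by norm_num) (fun _ => by norm_num)
        (fun h => absurd h (by decide))]
      simp [weave_eq]
  · -- column only: order_list has at least two rows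
    rw [Bool.not_eq_true] at hr
    have hlen : 2 ≤ order_list.length := hp2 (by
      rcases Bool.or_eq_true_iff.mp hc with h | h
      · exact Or.inl (by simpa using h)
      · exact Or.inr (by simpa using h))
    match order_list, hlen with
    | x0 :: x1 :: t, _ =>
      simp only [hr, hc, if_true, Bool.false_eq_true, if_false, List.getD_cons_succ,
        List.set_cons_succ, List.getD_cons_zero, List.set_cons_zero,
        PySem.List.enumerate_cons, List.map_cons]
      rw [enum_skip _ _ t (0 + 1 + 1) (by norm_num)
        (fun h => absurd h (by decide)) (fun _ => by norm_num)]
      simp [weave_eq]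
  · -- nothing selected: both sides are the original list
    rw [Bool.not_eq_true] at hr hc
    simp [hr, hc, PySem.List.map_snd_enumerate]
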